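-- pv_equiv track=rewrite | github.com/AkshatAsthana1412/Coding_practice_programs | C++ programs/Bit Manipulation/the_maximum_number.py | get_sums_arr
-- ===== SOURCE A (Python) =====
-- from collections import defaultdict, OrderedDict
--
-- def get_sums_arr(arr):
--     max_ele = max(arr)
--     d = defaultdict(int)
--     n = 1
--     while n <= max_ele:
--         for _, ele in enumerate(arr):
--             d[n] += ele & n
--         n <<= 1
--     return sorted(d.values(), reverse=True)
-- ===== SOURCE B (Python) =====
-- def get_sums_arr(arr):
--     max_ele = max(arr)
--     out = []
--     n = 1
--     prev = 0  # sum(e % 1 for e in arr) is always 0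
--     while n <= max_ele:
--         cur = sum(e % (2 * n) for e in arr)
--         out.append(cur - prev)
--         prev = cur
--         n *= 2
--     out.sort(reverse=True)
--     return out
-- ===== Notes on version B (the rewrite author's own statement) =====
-- stated objective: alternative
-- what changed: B drops the defaultdict and all bitwise operations: it uses the arithmetic identity e & 2^k = e % 2^(k+1) - e % 2^k, keeping one running total prev = sum(e % n) per power of two and emitting the telescoping difference cur - prev, then sorts the collected list descending; the telescoping sum halves the per-power work and avoids dict overhead.
import Mathlib
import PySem

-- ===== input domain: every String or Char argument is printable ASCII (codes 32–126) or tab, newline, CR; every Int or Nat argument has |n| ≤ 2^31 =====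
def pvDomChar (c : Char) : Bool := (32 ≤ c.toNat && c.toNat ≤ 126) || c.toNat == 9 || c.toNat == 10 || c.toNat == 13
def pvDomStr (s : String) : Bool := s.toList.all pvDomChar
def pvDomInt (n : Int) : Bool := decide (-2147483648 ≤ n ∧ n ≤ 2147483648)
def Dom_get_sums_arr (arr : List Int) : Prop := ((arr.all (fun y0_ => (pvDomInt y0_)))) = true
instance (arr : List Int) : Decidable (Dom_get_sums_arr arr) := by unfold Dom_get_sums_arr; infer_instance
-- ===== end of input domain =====

-- B drops the defaultdict and all bitwise operations: by the identity e & 2^k = e % 2^(k+1) - e % 2^k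
-- it keeps one running modular total per power of two and emits telescoping differences, then sorts.

-- ===== PORT A =====
-- while n <= max_ele: for _, ele in enumerate(arr): d[n] += ele & n; n <<= 1
-- (the '1 ≤ n' conjunct of the guard only makes termination evident; the loop is entered with
--  n = 1 and only doubles n, so it never changes which iterations run)
def get_sums_arr_loop (arr : List Int) (max_ele n : Int) (d : PySem.Dict Int Int) : PySem.Dict Int Int :=
  if _h : 1 ≤ n ∧ n ≤ max_ele then
    get_sums_arr_loop arr max_ele (n <<< (1:Nat))
      ((PySem.List.enumerate arr).foldl
        (fun dd p => dd.insert n (dd.getD n 0 + PySem.Int.band p.2 n)) d)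
  else d
termination_by (max_ele + 1 - n).toNat
decreasing_by
  simp only [Int.shiftLeft_eq]
  have h2 : (2:Int) ^ 1 = 2 := by norm_num
  rw [h2]; omega

def get_sums_arr (arr : List Int) : List Int :=
  match PySem.List.max? arr (fun x => x) with
  | none => []   -- max(arr) raises ValueError on []: excluded by Pre_
  | some max_ele =>
      PySem.List.sorted (get_sums_arr_loop arr max_ele 1 PySem.Dict.empty).values
        (fun x => x) true

-- ===== PORT B =====
-- while n <= max_ele: cur = sum(e % (2*n) for e in arr); out.append(cur - prev); prev = cur; n *= 2
-- (same '1 ≤ n' termination conjunct as in A's port; the loop starts at n = 1 and only doubles n)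
def get_sums_arr_alt_loop (arr : List Int) (max_ele n prev : Int) (out : List Int) : List Int :=
  if _h : 1 ≤ n ∧ n ≤ max_ele then
    let cur := (arr.map (fun e => PySem.Int.mod e (2 * n))).sum
    get_sums_arr_alt_loop arr max_ele (n * 2) cur (out ++ [cur - prev])
  else out
termination_by (max_ele + 1 - n).toNat
decreasing_by omega

def get_sums_arr_alt (arr : List Int) : List Int :=
  match PySem.List.max? arr (fun x => x) with
  | none => []   -- max(arr) raises ValueError on []: excluded by Pre_
  | some max_ele =>
      PySem.List.sorted (get_sums_arr_alt_loop arr max_ele 1 0 []) (fun x => x) true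

-- ===== PRECONDITION & SPEC =====
-- Pre_ excludes only the empty list, on which Python's max(arr) raises ValueError (in A and in B alike).
def Pre_get_sums_arr (arr : List Int) : Prop := arr ≠ []
instance (arr : List Int) : Decidable (Pre_get_sums_arr arr) := by unfold Pre_get_sums_arr; infer_instance

def pvWitness_get_sums_arr : List Int := [3, 1]

def Spec_get_sums_arr (arr : List Int) (out : List Int) : Prop := out = get_sums_arr_alt arr
instance (arr : List Int) (out : List Int) : Decidable (Spec_get_sums_arr arr out) := by unfold Spec_get_sums_arr; infer_instance

-- ===== CLAIM (what is proved, stated in full; the proofs are below) =====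
def Claim_equal_get_sums_arr : Prop := ∀ (arr : List Int), Dom_get_sums_arr arr → Pre_get_sums_arr arr → Spec_get_sums_arr arr (get_sums_arr arr)

-- ===== LEMMAS AND PROOFS =====

-- the successive values of n in both outer loops: 1, 2, 4, … while ≤ m
def powlist (n m : Int) : List Int :=
  if h : 1 ≤ n ∧ n ≤ m then n :: powlist (n * 2) m else []
termination_by (m + 1 - n).toNat
decreasing_by omega

lemma mem_powlist_ge (n m : Int) : ∀ p ∈ powlist n m, n ≤ p := by
  intro p hp
  fun_induction powlist n m with
  | case1 n h ih =>
    rw [List.mem_cons] at hp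
    rcases hp with rfl | hp
    · exact le_refl p
    · have := ih hp; omega
  | case2 n h => simp at hp

lemma mem_powlist_mul_pow (n m : Int) : ∀ q ∈ powlist n m, ∃ k : Nat, q = n * 2 ^ k := by
  intro q hq
  fun_induction powlist n m with
  | case1 n h ih =>
    rw [List.mem_cons] at hq
    rcases hq with rfl | hq
    · exact ⟨0, by ring⟩
    · obtain ⟨k, hk⟩ := ih hq
      exact ⟨k + 1, by rw [hk]; ring⟩
  | case2 n h => simp at hq

-- per-element bit identity, negative half helper
lemma negSucc_nat (a k : Nat) :
    2 ^ k - (2 ^ k &&& a) = (1 - (1 &&& (a >>> k))) <<< k := by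
  have h1 : (a >>> k) &&& 1 = (a.testBit k).toNat := by
    have : (1:Nat) = 2 ^ 0 := by norm_num
    rw [this, Nat.and_two_pow, Nat.testBit_shiftRight]
    simp
  rw [Nat.and_comm (2^k) a, Nat.and_two_pow, Nat.and_comm 1, h1, Nat.shiftLeft_eq]
  cases h : a.testBit k <;> simp

lemma band_negSucc_pow (a : Nat) (k : Nat) :
    PySem.Int.band (Int.negSucc a) ((2:Int) ^ k) = ((2 ^ k - (2 ^ k &&& a) : Nat) : Int) := by
  have hp : ((2:Int) ^ k) = (((2 ^ k : Nat)) : Int) := by push_cast; ring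
  have ha : (-Int.negSucc a - 1).toNat = a := by
    have : -(Int.negSucc a) - 1 = (a : Int) := by rw [Int.negSucc_eq]; ring
    rw [this, Int.toNat_natCast]
  rw [PySem.Int.band, if_neg (by omega), if_pos (by positivity)]
  rw [hp, Int.toNat_natCast, ha]

lemma band_negSucc_one (b : Nat) :
    PySem.Int.band (Int.negSucc b) 1 = ((1 - (1 &&& b) : Nat) : Int) := by
  have hb : (-Int.negSucc b - 1).toNat = b := by
    have : -(Int.negSucc b) - 1 = (b : Int) := by rw [Int.negSucc_eq]; ring
    rw [this, Int.toNat_natCast]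
  rw [PySem.Int.band, if_neg (by omega), if_pos (by norm_num)]
  rw [show (1:Int).toNat = 1 from rfl, hb]

-- e & 2^k = ((e >> k) & 1) << k
lemma band_two_pow (e : Int) (k : Nat) :
    PySem.Int.band e ((2:Int) ^ k) = (PySem.Int.band (e >>> k) 1) <<< k := by
  have hp : ((2:Int) ^ k) = (((2 ^ k : Nat)) : Int) := by push_cast; ring
  cases e with
  | ofNat a =>
    have h1 : (Int.ofNat a) >>> k = Int.ofNat (a >>> k) := rfl
    have h2 : (a >>> k) &&& 1 = (a.testBit k).toNat := by
      have : (1:Nat) = 2 ^ 0 := by norm_num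
      rw [this, Nat.and_two_pow, Nat.testBit_shiftRight]
      simp
    rw [hp, h1]
    show PySem.Int.band (a : Int) ((2^k : Nat) : Int) = (PySem.Int.band ((a >>> k : Nat) : Int) 1) <<< k
    rw [PySem.Int.band_natCast]
    rw [show (1:Int) = ((1:Nat) : Int) from rfl, PySem.Int.band_natCast]
    rw [show ((((a >>> k) &&& 1 : Nat)) : Int) <<< k = (((((a >>> k) &&& 1) <<< k : Nat)) : Int) from rfl]
    rw [Nat.and_two_pow, h2, Nat.shiftLeft_eq]
  | negSucc a =>
    rw [Int.negSucc_shiftRight, band_negSucc_pow, band_negSucc_one]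
    rw [show (((1 - (1 &&& (a >>> k)) : Nat)) : Int) <<< k = ((((1 - (1 &&& (a >>> k))) <<< k : Nat)) : Int) from rfl]
    rw [negSucc_nat]

-- THE identity B rests on: e & 2^k = e % 2^(k+1) - e % 2^k  (Python's floor-mod)
lemma band_eq_mod_sub_mod (e : Int) (k : Nat) :
    PySem.Int.band e ((2:Int) ^ k) = PySem.Int.mod e (2 ^ (k + 1)) - PySem.Int.mod e (2 ^ k) := by
  have hpk : (0:Int) < 2 ^ k := by positivity
  have hpk1 : (0:Int) < 2 ^ (k + 1) := by positivity
  rw [band_two_pow, PySem.Int.band_one,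
    PySem.Int.mod_eq_emod_of_pos (by norm_num : (0:Int) < 2),
    PySem.Int.mod_eq_emod_of_pos hpk1, PySem.Int.mod_eq_emod_of_pos hpk,
    Int.shiftRight_eq_div_pow, Int.shiftLeft_eq]
  set p : Int := 2 ^ k with hpdef
  have hp2 : (2:Int) ^ (k + 1) = 2 * p := by rw [hpdef]; ring
  set q : Int := e / p with hq
  set r : Int := e % p with hr
  have he : p * q + r = e := Int.mul_ediv_add_emod e p
  have hr0 : 0 ≤ r := Int.emod_nonneg e (by omega)
  have hrp : r < p := Int.emod_lt_of_pos e hpk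
  have hq2 : 2 * (q / 2) + q % 2 = q := Int.mul_ediv_add_emod q 2
  have ht : q % 2 = 0 ∨ q % 2 = 1 := by omega
  have hes : e = (p * (q % 2) + r) + (2 * p) * (q / 2) := by
    linear_combination he.symm + p * hq2.symm
  have hmod2p : e % (2 * p) = p * (q % 2) + r := by
    rw [hes, Int.add_mul_emod_self_left]
    apply Int.emod_eq_of_lt
    · rcases ht with h | h <;> rw [h] <;> omega
    · rcases ht with h | h <;> rw [h] <;> omega
  rw [hp2, hmod2p]
  push_cast
  rw [← hpdef, ← hq]
  ring
-- sum of a pointwise difference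
lemma sum_map_sub (l : List Int) (g h : Int → Int) :
    (l.map (fun e => g e - h e)).sum = (l.map g).sum - (l.map h).sum := by
  induction l with
  | nil => simp
  | cons a t ih => simp [ih]; ring

-- dict lookup skips a prefix whose keys differ from n
lemma get?_mk_append (l rest : List (Int × Int)) (n : Int) (h : ∀ p ∈ l, p.1 ≠ n) :
    (PySem.Dict.mk (l ++ rest)).get? n = (PySem.Dict.mk rest).get? n := by
  induction l with
  | nil => rfl
  | cons p t ih =>
    rw [List.cons_append]
    obtain ⟨a, b⟩ := p
    rw [PySem.Dict.get?_mk_cons]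
    have ha : a ≠ n := h (a, b) (List.mem_cons_self ..)
    simp only [beq_iff_eq, ha, if_false]
    exact ih (fun p hp => h p (List.mem_cons_of_mem _ hp))

-- A's inner loop once key n is present as last entry (prefix free of n): updates in place
lemma inner_items (n : Int) (l : List (Int × Int)) (h : ∀ p ∈ l, p.1 ≠ n) :
    ∀ (t : List Int) (v : Int),
    t.foldl (fun dd e => dd.insert n (dd.getD n 0 + PySem.Int.band e n))
        (PySem.Dict.mk (l ++ [(n, v)]))
      = PySem.Dict.mk (l ++ [(n, v + (t.map (fun e => PySem.Int.band e n)).sum)]) := by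
  intro t
  induction t with
  | nil => intro v; simp
  | cons e t ih =>
    intro v
    set d := PySem.Dict.mk (l ++ [(n, v)]) with hd
    have hget : d.get? n = some v := by
      rw [hd, get?_mk_append l [(n, v)] n h, PySem.Dict.get?_mk_cons]
      simp
    have hcont : d.contains n = true := by
      rw [PySem.Dict.contains_eq_isSome_get?, hget]; rfl
    have hgetD : d.getD n 0 = v := by
      rw [PySem.Dict.getD_eq_get?_getD, hget]; rfl
    have hins : d.insert n (v + PySem.Int.band e n)
        = PySem.Dict.mk (l ++ [(n, v + PySem.Int.band e n)]) := by
      have hit := PySem.Dict.items_insert_of_contains d (v + PySem.Int.band e n) hcont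
      have heta : (d.insert n (v + PySem.Int.band e n)) = PySem.Dict.mk ((d.insert n (v + PySem.Int.band e n)).items) := rfl
      rw [heta, hit, hd]
      congr 1
      rw [List.map_append]
      congr 1
      · have : ∀ p ∈ l, (if (p.1 == n) = true then ((n, v + PySem.Int.band e n) : Int × Int) else p) = id p := by
          intro p hp
          simp [h p hp]
        rw [List.map_congr_left this, List.map_id]
      · simp
    rw [List.foldl_cons, hgetD, hins, ih (v + PySem.Int.band e n)]
    rw [List.map_cons, List.sum_cons, add_assoc]

-- A's inner loop on a dict not containing n and a nonempty array appends one entry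
lemma inner_fresh (n : Int) (d : PySem.Dict Int Int) (hd : ∀ p ∈ d.items, p.1 ≠ n)
    (t : List Int) (ht : t ≠ []) :
    (t.foldl (fun dd e => dd.insert n (dd.getD n 0 + PySem.Int.band e n)) d).items
      = d.items ++ [(n, (t.map (fun e => PySem.Int.band e n)).sum)] := by
  obtain ⟨e, t', rfl⟩ := List.exists_cons_of_ne_nil ht
  have hget : d.get? n = none := by
    have heta : d = PySem.Dict.mk (d.items ++ []) := by simp
    rw [heta, get?_mk_append d.items [] n hd]
    rfl
  have hcont : d.contains n = false := by
    rw [PySem.Dict.contains_eq_isSome_get?, hget]; rfl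
  have hgetD : d.getD n 0 = 0 := PySem.Dict.getD_of_not_contains d 0 hcont
  have hins : d.insert n (0 + PySem.Int.band e n)
      = PySem.Dict.mk (d.items ++ [(n, PySem.Int.band e n)]) := by
    have heta : (d.insert n (0 + PySem.Int.band e n)) = PySem.Dict.mk ((d.insert n (0 + PySem.Int.band e n)).items) := rfl
    rw [heta, PySem.Dict.items_insert_of_not_contains d _ hcont, zero_add]
  rw [List.foldl_cons, hgetD, hins, inner_items n d.items hd t' (PySem.Int.band e n)]
  rw [List.map_cons, List.sum_cons]

-- A's outer loop appends one entry per power in powlist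
lemma loop_items (arr : List Int) (ha : arr ≠ []) (m : Int) :
    ∀ (fuel : Nat) (n : Int) (d : PySem.Dict Int Int), (m + 1 - n).toNat ≤ fuel →
    (∀ p ∈ d.items, ∀ q ∈ powlist n m, p.1 ≠ q) →
    (get_sums_arr_loop arr m n d).items
      = d.items ++ (powlist n m).map (fun q => (q, (arr.map (fun e => PySem.Int.band e q)).sum)) := by
  intro fuel
  induction fuel with
  | zero =>
    intro n d hf hdisj
    rw [get_sums_arr_loop, powlist]
    have hc : ¬ (1 ≤ n ∧ n ≤ m) := by omega
    rw [dif_neg hc, dif_neg hc]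
    simp
  | succ fuel ih =>
    intro n d hf hdisj
    by_cases hc : 1 ≤ n ∧ n ≤ m
    · have hpl : powlist n m = n :: powlist (n * 2) m := by rw [powlist, dif_pos hc]
      rw [get_sums_arr_loop, dif_pos hc]
      have hfold : (PySem.List.enumerate arr).foldl
          (fun dd p => dd.insert n (dd.getD n 0 + PySem.Int.band p.2 n)) d
          = arr.foldl (fun dd e => dd.insert n (dd.getD n 0 + PySem.Int.band e n)) d := by
        have h2 := List.foldl_map (f := fun (p : Int × Int) => p.2)
          (g := fun dd (x : Int) => dd.insert n (dd.getD n 0 + PySem.Int.band x n))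
          (l := PySem.List.enumerate arr 0) (init := d)
        rw [PySem.List.map_snd_enumerate] at h2
        exact h2.symm
      have hfresh : ∀ p ∈ d.items, p.1 ≠ n := by
        intro p hp
        exact hdisj p hp n (by rw [hpl]; exact List.mem_cons_self ..)
      have hsh : n <<< (1:Nat) = n * 2 := by
        rw [Int.shiftLeft_eq]; norm_num
      rw [hfold, hsh]
      set d' := arr.foldl (fun dd e => dd.insert n (dd.getD n 0 + PySem.Int.band e n)) d with hd'
      have hitems : d'.items = d.items ++ [(n, (arr.map (fun e => PySem.Int.band e n)).sum)] :=
        inner_fresh n d hfresh arr ha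
      have hdisj' : ∀ p ∈ d'.items, ∀ q ∈ powlist (n * 2) m, p.1 ≠ q := by
        intro p hp q hq
        rw [hitems, List.mem_append] at hp
        have hq2 : n * 2 ≤ q := mem_powlist_ge (n * 2) m q hq
        rcases hp with hp | hp
        · exact hdisj p hp q (by rw [hpl]; exact List.mem_cons_of_mem _ hq)
        · have hpn : p.1 = n := by
            rw [List.mem_singleton] at hp
            rw [hp]
          rw [hpn]
          omega
      rw [ih (n * 2) d' (by omega) hdisj', hitems, hpl]
      simp [List.append_assoc]
    · rw [get_sums_arr_loop, powlist, dif_neg hc, dif_neg hc]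
      simp

-- B's loop, run with prev = sum(e % n), appends the telescoping differences along powlist
lemma alt_loop_eq (arr : List Int) (m : Int) :
    ∀ (fuel : Nat) (n : Int) (out : List Int), (m + 1 - n).toNat ≤ fuel →
    get_sums_arr_alt_loop arr m n ((arr.map (fun e => PySem.Int.mod e n)).sum) out
      = out ++ (powlist n m).map
          (fun q => (arr.map (fun e => PySem.Int.mod e (2 * q))).sum
                    - (arr.map (fun e => PySem.Int.mod e q)).sum) := by
  intro fuel
  induction fuel with
  | zero =>
    intro n out hf
    rw [get_sums_arr_alt_loop, powlist]
    have hc : ¬ (1 ≤ n ∧ n ≤ m) := by omega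
    rw [dif_neg hc, dif_neg hc]
    simp
  | succ fuel ih =>
    intro n out hf
    by_cases hc : 1 ≤ n ∧ n ≤ m
    · rw [get_sums_arr_alt_loop, dif_pos hc, powlist, dif_pos hc]
      have h2n : 2 * n = n * 2 := by ring
      simp only [h2n]
      rw [ih (n * 2) _ (by omega)]
      simp [List.append_assoc, h2n]
    · rw [get_sums_arr_alt_loop, powlist, dif_neg hc, dif_neg hc]
      simp

-- ===== VERDICT (by name: the statement is the Claim_ definition above) =====
theorem get_sums_arr_spec : Claim_equal_get_sums_arr := by
  intro arr _hdom hpre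
  unfold Spec_get_sums_arr
  unfold get_sums_arr get_sums_arr_alt
  cases hmax : PySem.List.max? arr (fun x => x) with
  | none => exact absurd ((PySem.List.max?_eq_none_iff arr (fun x => x)).mp hmax) hpre
  | some m =>
    simp only []
    -- A's pre-sort list
    have hempty : (PySem.Dict.empty : PySem.Dict Int Int).items = [] := rfl
    have hloop := loop_items arr hpre m (m + 1 - 1).toNat 1 PySem.Dict.empty (by omega)
      (by intro p hp q hq
          rw [hempty] at hp
          exact absurd hp (List.not_mem_nil))
    have hv : (get_sums_arr_loop arr m 1 PySem.Dict.empty).values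
        = (get_sums_arr_loop arr m 1 PySem.Dict.empty).items.map (fun x => x.2) :=
      PySem.Dict.values_mk (get_sums_arr_loop arr m 1 PySem.Dict.empty).items
    -- B's pre-sort list: prev = 0 = sum(e % 1)
    have hmod1 : (arr.map (fun e => PySem.Int.mod e 1)).sum = 0 := by
      have : ∀ e ∈ arr, PySem.Int.mod e 1 = 0 := by
        intro e _
        exact (PySem.Int.mod_eq_zero_iff_dvd e 1).mpr (one_dvd e)
      rw [List.map_congr_left this]
      simp
    have halt := alt_loop_eq arr m (m + 1 - 1).toNat 1 [] (by omega)
    rw [hmod1] at halt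
    rw [hv, hloop, hempty, List.nil_append, halt, List.nil_append, List.map_map]
    congr 1
    apply List.map_congr_left
    intro q hq
    obtain ⟨k, hk⟩ := mem_powlist_mul_pow 1 m q hq
    rw [one_mul] at hk
    subst hk
    simp only [Function.comp_apply]
    have hid : ∀ e ∈ arr, PySem.Int.band e (2 ^ k)
        = PySem.Int.mod e (2 ^ (k + 1)) - PySem.Int.mod e (2 ^ k) := by
      intro e _
      exact band_eq_mod_sub_mod e k
    rw [List.map_congr_left hid, sum_map_sub]
    have h2p : (2:Int) * 2 ^ k = 2 ^ (k + 1) := by ring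
    rw [h2p]
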